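-- pv_equiv track=rewrite | github.com/huiseon37/PS | Programmers/Python/프렌즈4블록.py | solution
-- ===== SOURCE A (Python) =====
-- def game(m, n, board):
--     delete = []
--
--     for i in range(m-1):
--         for j in range(n-1):
--             if board[i][j] == board[i][j+1] and board[i][j] != 0:
--                 if board[i][j] == board[i+1][j] and board[i+1][j] == board[i+1][j+1]:
--                     delete += [[i,j], [i,j+1], [i+1,j], [i+1,j+1]]
--
--     for x, y in delete:
--         board[x][y] = 0
--
--     for i in range(m-1, 0, -1):
--         for j in range(n):
--             if board[i][j] == 0:
--                 mi = i
--                 while board[mi][j] == 0 and mi > 0: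
--                     mi -= 1
--                 board[i][j] = board[mi][j]
--                 board[mi][j] = 0
--
--     return (len(delete), board)
--
-- def solution(m, n, board):
--     board = [list(row) for row in board]
--
--     while True:
--         isEnd, board = game(m, n, board)
--         if isEnd == 0:
--             cnt = 0
--             for row in board:
--                 cnt += row.count(0)
--             return cnt
-- ===== SOURCE B (Python) =====
-- def solution(m, n, board):
--     grid = [list(row) for row in board]
--     while True:
--         marked = set()
--         for i in range(m - 1):
--             for j in range(n - 1):
--                 v = grid[i][j]
--                 if v != 0 and v == grid[i][j + 1] and v == grid[i + 1][j] and v == grid[i + 1][j + 1]: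
--                     marked.update({(i, j), (i, j + 1), (i + 1, j), (i + 1, j + 1)})
--         if not marked:
--             return sum(row.count(0) for row in grid)
--         for j in range(n):
--             stack = [grid[i][j] for i in range(m) if grid[i][j] != 0 and (i, j) not in marked]
--             col = [0] * (m - len(stack)) + stack
--             for i in range(m):
--                 grid[i][j] = col[i]
-- ===== Notes on version B (the rewrite author's own statement) =====
-- stated objective: simpler
-- what changed: Marks 2x2 blocks into a set instead of a duplicated coordinate list, and replaces the in-place bottom-up while-search gravity compaction with a functional column rebuild: each column becomes leading zeros followed by its surviving non-zero cells in order.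
import Mathlib
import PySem

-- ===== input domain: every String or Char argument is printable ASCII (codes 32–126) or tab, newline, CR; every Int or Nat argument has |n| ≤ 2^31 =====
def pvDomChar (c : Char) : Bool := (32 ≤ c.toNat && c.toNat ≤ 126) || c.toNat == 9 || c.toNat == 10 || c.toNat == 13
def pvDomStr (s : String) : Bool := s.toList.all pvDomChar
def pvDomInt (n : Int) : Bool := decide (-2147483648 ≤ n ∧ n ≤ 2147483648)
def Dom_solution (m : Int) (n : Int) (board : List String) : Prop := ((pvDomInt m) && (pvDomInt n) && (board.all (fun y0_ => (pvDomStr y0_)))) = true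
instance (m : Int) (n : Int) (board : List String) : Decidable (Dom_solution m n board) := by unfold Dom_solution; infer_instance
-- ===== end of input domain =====

-- B marks 2x2 blocks into a set and rebuilds each column as zeros ++ surviving non-zeros,
-- instead of A's duplicated delete list and in-place bottom-up while-search compaction (simpler round structure).
-- A mutates its own local copy of the board only; the equivalence is about the return value.

-- ===== PORT A =====
-- cells are char codes (Int, always ≠ 0 on Dom) or 0 for an emptied cell, mirroring Python's char/int-0 mix
def pvToGrid (board : List String) : List (List Int) :=
  board.map (fun s => s.toList.map (fun c => (c.toNat : Int)))

def pvCell (g : List (List Int)) (i j : Nat) : Int := (g.getD i []).getD j 0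

def pvSet (g : List (List Int)) (i j : Nat) (v : Int) : List (List Int) :=
  g.modify i (fun row => row.set j v)

-- while board[mi][j] == 0 and mi > 0: mi -= 1
def pvFindMi (g : List (List Int)) (j : Nat) : Nat → Nat
  | 0 => 0
  | mi+1 => if pvCell g (mi+1) j = 0 then pvFindMi g j mi else mi+1

-- body of A's gravity loop at (i, j)
def pvGravOp (g : List (List Int)) (i j : Nat) : List (List Int) :=
  if pvCell g i j = 0 then
    let mi := pvFindMi g j i
    let g1 := pvSet g i j (pvCell g mi j)
    pvSet g1 mi j 0
  else g

-- the delete list, with duplicates, as A builds it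
def pvDelete (m n : Int) (g : List (List Int)) : List (Nat × Nat) :=
  (List.range (m-1).toNat).foldl (fun acc i =>
    (List.range (n-1).toNat).foldl (fun acc j =>
      if pvCell g i j = pvCell g i (j+1) ∧ pvCell g i j ≠ 0 then
        if pvCell g i j = pvCell g (i+1) j ∧ pvCell g (i+1) j = pvCell g (i+1) (j+1) then
          acc ++ [(i,j), (i,j+1), (i+1,j), (i+1,j+1)]
        else acc
      else acc) acc) []

def pvGame (m n : Int) (g : List (List Int)) : Nat × List (List Int) :=
  let delete := pvDelete m n g
  let g1 := delete.foldl (fun g p => pvSet g p.1 p.2 0) g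
  -- for i in range(m-1, 0, -1): for j in range(n):
  let g2 := ((List.range' 1 (m-1).toNat).reverse).foldl (fun g i =>
      (List.range n.toNat).foldl (fun g j => pvGravOp g i j) g) g1
  (delete.length, g2)

def pvCountZeros (g : List (List Int)) : Int :=
  g.foldl (fun acc row => acc + (row.count 0 : Int)) 0

-- measure for A's while-True loop (number of non-zero cells)
def pvCountNZ (g : List (List Int)) : Nat :=
  (g.map (fun r => r.countP (fun v => !(v == 0)))).sum

-- base lemmas on the grid primitives (feed the termination proof of pvLoopA below)
theorem pv_length_pvSet (g : List (List Int)) (i j : Nat) (v : Int) :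
    (pvSet g i j v).length = g.length := List.length_modify ..

theorem pv_rowlen_pvSet (g : List (List Int)) (i j : Nat) (v : Int) (a : Nat) :
    ((pvSet g i j v).getD a []).length = (g.getD a []).length := by
  unfold pvSet
  rw [List.getD_eq_getElem?_getD, List.getD_eq_getElem?_getD, List.getElem?_modify]
  cases h : g[a]? with
  | none => simp
  | some row => by_cases hi : i = a <;> simp [hi]

theorem pv_pvCell_pvSet (g : List (List Int)) (i j : Nat) (v : Int) (a b : Nat) :
    pvCell (pvSet g i j v) a b =
      if i = a ∧ j = b ∧ i < g.length ∧ j < (g.getD i []).length then v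
      else pvCell g a b := by
  unfold pvCell pvSet
  rw [List.getD_eq_getElem?_getD (l := g.modify ..), List.getD_eq_getElem?_getD (l := g),
    List.getElem?_modify]
  by_cases hi : i = a
  · subst hi
    cases h : g[i]? with
    | none =>
      have hlen : ¬ i < g.length := by
        simpa using List.getElem?_eq_none_iff.mp h
      simp [hlen]
    | some row =>
      have hlen : i < g.length := by
        obtain ⟨hl, -⟩ := List.getElem?_eq_some_iff.mp h
        exact hl
      obtain ⟨hl2, hgi⟩ := List.getElem?_eq_some_iff.mp h
      have hrow : g.getD i [] = row := by
        rw [List.getD_eq_getElem?_getD, h]; rfl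
      simp only [if_true, true_and, Option.map_eq_map, Option.map_some, Option.getD_some]
      rw [List.getD_eq_getElem?_getD, List.getD_eq_getElem?_getD, List.getElem?_set]
      by_cases hj : j = b
      · subst hj
        by_cases hjl : j < row.length
        · simp [hjl, hlen, hrow]
        · simp [hjl, hlen, hrow, hgi, List.getElem?_eq_none (Nat.le_of_not_lt hjl)]
      · simp [hj, hrow, hlen, hgi, fun h : j = b => hj h]
  · simp [hi]

-- list is unchanged when the write is out of range
theorem pv_pvSet_out (g : List (List Int)) (i j : Nat) (v : Int)
    (h : ¬ (i < g.length ∧ j < (g.getD i []).length)) : pvSet g i j v = g := by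
  unfold pvSet
  apply List.ext_getElem?
  intro a
  rw [List.getElem?_modify]
  cases ha : g[a]? with
  | none => rfl
  | some row =>
    by_cases hi : i = a
    · subst hi
      have hlen : i < g.length := by
        obtain ⟨hl, -⟩ := List.getElem?_eq_some_iff.mp ha
        exact hl
      have hrow : g.getD i [] = row := by rw [List.getD_eq_getElem?_getD, ha]; rfl
      have hj : ¬ j < row.length := by rw [hrow] at h; tauto
      have hle : row.length ≤ j := by omega
      simp [List.set_eq_of_length_le hle]
    · simp [hi]

theorem pv_sum_decomp_nat (l : List Nat) (i : Nat) (h : i < l.length) :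
    l.sum = (l.take i).sum + l[i] + (l.drop (i+1)).sum := by
  conv_lhs => rw [← List.take_append_drop i l, ← List.getElem_cons_drop h]
  rw [List.sum_append, List.sum_cons]
  omega

theorem pv_sum_set_nat (l : List Nat) (i : Nat) (a : Nat) (h : i < l.length) :
    (l.set i a).sum + l[i] = l.sum + a := by
  rw [List.set_eq_take_append_cons_drop, if_pos h, pv_sum_decomp_nat l i h]
  simp [List.sum_append]
  omega

-- modify in range is a set
theorem pv_modify_in (g : List (List Int)) (i : Nat) (f : List Int → List Int)
    (h : i < g.length) : g.modify i f = g.set i (f g[i]) := by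
  apply List.ext_getElem?
  intro a
  rw [List.getElem?_modify, List.getElem?_set]
  by_cases hi : i = a
  · subst hi; simp [List.getElem?_eq_getElem h, h]
  · simp [hi]

theorem pv_countNZ_set (g : List (List Int)) (i j : Nat) (v : Int)
    (hi : i < g.length) (hj' : j < (g.getD i []).length) :
    pvCountNZ (pvSet g i j v) + (if pvCell g i j = 0 then 0 else 1)
      = pvCountNZ g + (if v = 0 then 0 else 1) := by
  have hrow : g.getD i [] = g[i] := List.getD_eq_getElem g [] hi
  have hj : j < g[i].length := by rw [hrow] at hj'; exact hj'
  unfold pvCountNZ pvSet pvCell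
  rw [pv_modify_in g i _ hi, List.map_set]
  have hml : i < (g.map (fun r => List.countP (fun v => !(v == 0)) r)).length := by simpa using hi
  have hs := pv_sum_set_nat (g.map (fun r => List.countP (fun v => !(v == 0)) r)) i
      (List.countP (fun v => !(v == 0)) (g[i].set j v)) hml
  rw [List.getElem_map] at hs
  have hcp := List.countP_set (p := fun v => !(v == 0)) (l := g[i]) (i := j) (a := v) hj
  have hle1 : g[i][j] ≠ 0 → 1 ≤ List.countP (fun v => !(v == 0)) g[i] := by
    intro hz
    have hp : (fun v => !(v == 0)) g[i][j] = true := by simp [hz]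
    have hpos := List.countP_pos_iff (p := fun v => !(v == 0)) (l := g[i]) |>.mpr
      ⟨g[i][j], List.getElem_mem hj, hp⟩
    omega
  rw [hrow, List.getD_eq_getElem _ _ hj]
  have hcp' : List.countP (fun v => !(v == 0)) (g[i].set j v) + (if g[i][j] = 0 then 0 else 1)
      = List.countP (fun v => !(v == 0)) g[i] + (if v = 0 then 0 else 1) := by
    rcases eq_or_ne (g[i][j]) 0 with hz | hz <;> rcases eq_or_ne v 0 with hv | hv <;>
      simp [hz, hv] at hcp ⊢
    · omega
    · omega
    · have h1 := hle1 hz; omega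
    · have h1 := hle1 hz; omega
  omega

theorem pv_cell_in_of_nz (g : List (List Int)) (i j : Nat) (h : pvCell g i j ≠ 0) :
    i < g.length ∧ j < (g.getD i []).length := by
  by_contra hc
  apply h
  unfold pvCell
  by_cases hi : i < g.length
  · have hj : ¬ j < (g.getD i []).length := by tauto
    rw [List.getD_eq_getElem?_getD, List.getElem?_eq_none (by omega)]
    rfl
  · rw [List.getD_eq_getElem?_getD (l := g), List.getElem?_eq_none (by omega)]
    rfl

theorem pv_countNZ_set0_le (g : List (List Int)) (i j : Nat) :
    pvCountNZ (pvSet g i j 0) ≤ pvCountNZ g := by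
  by_cases h : i < g.length ∧ j < (g.getD i []).length
  · have he := pv_countNZ_set g i j 0 h.1 h.2
    simp at he
    split at he <;> omega
  · rw [pv_pvSet_out _ _ _ _ h]

theorem pv_countNZ_set0_lt (g : List (List Int)) (i j : Nat) (hnz : pvCell g i j ≠ 0) :
    pvCountNZ (pvSet g i j 0) < pvCountNZ g := by
  obtain ⟨hi, hj⟩ := pv_cell_in_of_nz g i j hnz
  have he := pv_countNZ_set g i j 0 hi hj
  simp [hnz] at he
  omega

theorem pv_countNZ_gravOp_le (g : List (List Int)) (i j : Nat) :
    pvCountNZ (pvGravOp g i j) ≤ pvCountNZ g := by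
  unfold pvGravOp
  split
  · next hz =>
    dsimp only
    set mi := pvFindMi g j i with hmi
    by_cases hv : pvCell g mi j = 0
    · have h1 : pvCountNZ (pvSet g i j (pvCell g mi j)) ≤ pvCountNZ g := by
        rw [hv]; exact pv_countNZ_set0_le g i j
      calc pvCountNZ (pvSet (pvSet g i j (pvCell g mi j)) mi j 0)
          ≤ pvCountNZ (pvSet g i j (pvCell g mi j)) := pv_countNZ_set0_le ..
        _ ≤ pvCountNZ g := h1
    · -- moved value is non-zero: source cell is in range and distinct from (i, j)
      obtain ⟨hmi1, hmi2⟩ := pv_cell_in_of_nz g mi j hv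
      have hne : mi ≠ i := fun he => hv (by rw [he]; exact hz)
      by_cases hin : i < g.length ∧ j < (g.getD i []).length
      · have h1 := pv_countNZ_set g i j (pvCell g mi j) hin.1 hin.2
        simp [hz, hv] at h1
        have hcell2 : pvCell (pvSet g i j (pvCell g mi j)) mi j = pvCell g mi j := by
          rw [pv_pvCell_pvSet]
          simp [hne.symm]
        have h2 := pv_countNZ_set (pvSet g i j (pvCell g mi j)) mi j 0
          (by rw [pv_length_pvSet]; exact hmi1) (by rw [pv_rowlen_pvSet]; exact hmi2)
        simp [hcell2, hv] at h2
        omega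
      · rw [pv_pvSet_out _ _ _ _ hin]
        have h2 := pv_countNZ_set g mi j 0 hmi1 hmi2
        simp [hv] at h2
        omega
  · exact le_refl _

theorem pv_countNZ_grav_fold_le (g : List (List Int)) (is : List Nat) (n : Int) :
    pvCountNZ (is.foldl (fun g i => (List.range n.toNat).foldl (fun g j => pvGravOp g i j) g) g)
      ≤ pvCountNZ g := by
  induction is generalizing g with
  | nil => exact le_refl _
  | cons i t ih =>
    simp only [List.foldl_cons]
    refine le_trans (ih _) ?_
    generalize (List.range n.toNat) = js
    induction js generalizing g with
    | nil => exact le_refl _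
    | cons j jt ihj =>
      simp only [List.foldl_cons]
      exact le_trans (ihj _) (pv_countNZ_gravOp_le g i j)

theorem pv_countNZ_zero_fold_le (g : List (List Int)) (l : List (Nat × Nat)) :
    pvCountNZ (l.foldl (fun g p => pvSet g p.1 p.2 0) g) ≤ pvCountNZ g := by
  induction l generalizing g with
  | nil => exact le_refl _
  | cons p t ih =>
    simp only [List.foldl_cons]
    exact le_trans (ih _) (pv_countNZ_set0_le g p.1 p.2)

-- every cell recorded in A's delete list is non-zero in the scanned grid
theorem pv_delete_mem_nz (m n : Int) (g : List (List Int)) :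
    ∀ p ∈ pvDelete m n g, pvCell g p.1 p.2 ≠ 0 := by
  unfold pvDelete
  suffices h : ∀ (is : List Nat) (acc : List (Nat × Nat)),
      (∀ p ∈ acc, pvCell g p.1 p.2 ≠ 0) →
      ∀ p ∈ is.foldl (fun acc i => (List.range (n-1).toNat).foldl (fun acc j =>
        if pvCell g i j = pvCell g i (j+1) ∧ pvCell g i j ≠ 0 then
          if pvCell g i j = pvCell g (i+1) j ∧ pvCell g (i+1) j = pvCell g (i+1) (j+1) then
            acc ++ [(i,j), (i,j+1), (i+1,j), (i+1,j+1)]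
          else acc
        else acc) acc) acc, pvCell g p.1 p.2 ≠ 0 by
    exact h _ [] (by simp)
  intro is
  induction is with
  | nil => intro acc hacc; simpa using hacc
  | cons i t ih =>
    intro acc hacc
    simp only [List.foldl_cons]
    apply ih
    generalize (List.range (n-1).toNat) = js
    induction js generalizing acc with
    | nil => simpa using hacc
    | cons j jt ihj =>
      simp only [List.foldl_cons]
      apply ihj
      intro p hp
      split at hp
      · next h1 =>
        split at hp
        · next h2 =>
          simp only [List.mem_append] at hp
          rcases hp with hp | hp
          · exact hacc p hp
          · simp only [List.mem_cons] at hp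
            rcases hp with rfl | rfl | rfl | rfl | h
            · exact h1.2
            · simpa using h1.1 ▸ h1.2
            · simpa using h2.1 ▸ h1.2
            · have : pvCell g (i+1) (j+1) = pvCell g i j := by
                rw [← h2.2, ← h2.1]
              simpa [this] using h1.2
            · simp at h
        · exact hacc p hp
      · exact hacc p hp

theorem pvGame_decreases (m n : Int) (g : List (List Int))
    (h : (pvGame m n g).1 ≠ 0) : pvCountNZ (pvGame m n g).2 < pvCountNZ g := by
  unfold pvGame at h ⊢
  dsimp only at h ⊢
  cases hD : pvDelete m n g with
  | nil => rw [hD] at h; simp at h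
  | cons p t =>
    refine lt_of_le_of_lt (pv_countNZ_grav_fold_le _ _ _) ?_
    simp only [List.foldl_cons]
    refine lt_of_le_of_lt (pv_countNZ_zero_fold_le _ _) ?_
    exact pv_countNZ_set0_lt g p.1 p.2
      (pv_delete_mem_nz m n g p (hD ▸ List.mem_cons_self ..))

def pvLoopA (m n : Int) (g : List (List Int)) : Int :=
  let r := pvGame m n g
  if h : r.1 = 0 then pvCountZeros r.2 else pvLoopA m n r.2
termination_by pvCountNZ g
decreasing_by exact pvGame_decreases m n g h

def solution (m : Int) (n : Int) (board : List String) : Int :=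
  pvLoopA m n (pvToGrid board)

-- ===== PORT B =====
def pvMarkedSet (m n : Int) (g : List (List Int)) : PySem.Set (Nat × Nat) :=
  (List.range (m-1).toNat).foldl (fun s i =>
    (List.range (n-1).toNat).foldl (fun s j =>
      let v := pvCell g i j
      if v ≠ 0 ∧ v = pvCell g i (j+1) ∧ v = pvCell g (i+1) j ∧ v = pvCell g (i+1) (j+1) then
        PySem.Set.update s [(i,j), (i,j+1), (i+1,j), (i+1,j+1)]
      else s) s) PySem.Set.empty

-- column rebuild: leading zeros, then the surviving non-zero cells top-to-bottom
def pvRebuildCol (m : Int) (marked : PySem.Set (Nat × Nat)) (g : List (List Int)) (j : Nat) :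
    List (List Int) :=
  let stack := ((List.range m.toNat).filter
      (fun i => !(pvCell g i j == 0) && !(PySem.Set.contains marked (i, j)))).map
      (fun i => pvCell g i j)
  let colL := List.replicate (m.toNat - stack.length) 0 ++ stack
  (List.range m.toNat).foldl (fun g i => pvSet g i j (colL.getD i 0)) g

-- fuel only makes the loop total; it is always sufficient (each round kills ≥ 1 non-zero cell)
def pvLoopB (m n : Int) (fuel : Nat) (g : List (List Int)) : Int :=
  match fuel with
  | 0 => 0
  | fuel+1 =>
    let marked := pvMarkedSet m n g
    if marked.isEmpty then pvCountZeros g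
    else pvLoopB m n fuel ((List.range n.toNat).foldl (fun g j => pvRebuildCol m marked g j) g)

def solution_alt (m : Int) (n : Int) (board : List String) : Int :=
  pvLoopB m n (pvCountNZ (pvToGrid board) + 1) (pvToGrid board)

-- ===== PRECONDITION & SPEC =====
-- Pre_ excludes exactly the inputs where Python A raises an IndexError: when a real round is
-- possible (m ≥ 2 and n ≥ 1) the first m rows must exist and each have at least n characters.
def Pre_solution (m : Int) (n : Int) (board : List String) : Prop :=
  1 < m → 0 < n → (m ≤ (board.length : Int) ∧ ∀ s ∈ board.take m.toNat, n ≤ (s.length : Int))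
instance (m : Int) (n : Int) (board : List String) : Decidable (Pre_solution m n board) := by
  unfold Pre_solution; infer_instance

def pvWitness_solution : Int × Int × List String := (2, 2, ["aab", "aac"])

def Spec_solution (m : Int) (n : Int) (board : List String) (out : Int) : Prop := out = solution_alt m n board
instance (m : Int) (n : Int) (board : List String) (out : Int) : Decidable (Spec_solution m n board out) := by unfold Spec_solution; infer_instance

-- ===== CLAIM (what is proved, stated in full; the proofs are below) =====
def Claim_equal_solution : Prop := ∀ (m : Int) (n : Int) (board : List String), Dom_solution m n board → Pre_solution m n board → Spec_solution m n board (solution m n board)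

-- ===== LEMMAS AND PROOFS =====

theorem pv_sum_decomp_int (l : List Int) (i : Nat) (h : i < l.length) :
    l.sum = (l.take i).sum + l[i] + (l.drop (i+1)).sum := by
  conv_lhs => rw [← List.take_append_drop i l, ← List.getElem_cons_drop h]
  rw [List.sum_append, List.sum_cons]
  ring


theorem pv_sum_set_int (l : List Int) (i : Nat) (a : Int) (h : i < l.length) :
    (l.set i a).sum = l.sum - l[i] + a := by
  rw [List.set_eq_take_append_cons_drop, if_pos h, pv_sum_decomp_int l i h]
  simp [List.sum_append]
  ring


theorem pv_countZeros_eq (g : List (List Int)) :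
    pvCountZeros g = (g.map (fun r => (r.count 0 : Int))).sum := by
  unfold pvCountZeros
  suffices h : ∀ (acc : Int), g.foldl (fun acc row => acc + (row.count 0 : Int)) acc
      = acc + (g.map (fun r => (r.count 0 : Int))).sum by
    simpa using h 0
  induction g with
  | nil => simp
  | cons r t ih => intro acc; simp [List.foldl_cons, ih]; ring



-- ---------- proof-layer definitions ----------

def pvDims (g g' : List (List Int)) : Prop :=
  g.length = g'.length ∧ ∀ a, (g.getD a []).length = (g'.getD a []).length

def pvShapeN (M N : Nat) (g : List (List Int)) : Prop :=
  M ≤ g.length ∧ ∀ i, i < M → N ≤ (g.getD i []).length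

def pvCol (m : Nat) (g : List (List Int)) (j : Nat) : List Int :=
  (List.range m).map (fun i => pvCell g i j)

def pvColFindMi (c : List Int) : Nat → Nat
  | 0 => 0
  | mi+1 => if c.getD (mi+1) 0 = 0 then pvColFindMi c mi else mi+1

def pvColGravOp (c : List Int) (i : Nat) : List Int :=
  if c.getD i 0 = 0 then
    (c.set i (c.getD (pvColFindMi c i) 0)).set (pvColFindMi c i) 0
  else c

def pvColSpec (c : List Int) : List Int :=
  List.replicate (c.length - c.countP (fun v => !(v == 0))) 0 ++ c.filter (fun v => !(v == 0))

-- ---------- dims ----------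

theorem pv_dims_refl (g : List (List Int)) : pvDims g g := ⟨rfl, fun _ => rfl⟩

theorem pv_dims_trans {g1 g2 g3 : List (List Int)} (h1 : pvDims g1 g2) (h2 : pvDims g2 g3) :
    pvDims g1 g3 := ⟨h1.1.trans h2.1, fun a => (h1.2 a).trans (h2.2 a)⟩

theorem pv_dims_pvSet (g : List (List Int)) (i j : Nat) (v : Int) : pvDims g (pvSet g i j v) :=
  ⟨(pv_length_pvSet g i j v).symm, fun a => (pv_rowlen_pvSet g i j v a).symm⟩

theorem pv_dims_gravOp (g : List (List Int)) (i j : Nat) : pvDims g (pvGravOp g i j) := by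
  unfold pvGravOp
  split
  · exact pv_dims_trans (pv_dims_pvSet ..) (pv_dims_pvSet ..)
  · exact pv_dims_refl g

theorem pv_shape_of_dims {M N : Nat} {g g' : List (List Int)} (hs : pvShapeN M N g)
    (hd : pvDims g g') : pvShapeN M N g' :=
  ⟨hd.1 ▸ hs.1, fun i hi => (hd.2 i) ▸ hs.2 i hi⟩

theorem pv_eq_of_cells {g g' : List (List Int)} (hd : pvDims g g')
    (hc : ∀ a b, pvCell g a b = pvCell g' a b) : g = g' := by
  apply List.ext_getElem hd.1
  intro a ha ha'
  have hrow : g.getD a [] = g[a] := List.getD_eq_getElem g [] ha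
  have hrow' : g'.getD a [] = g'[a] := List.getD_eq_getElem g' [] ha'
  have hlen : g[a].length = g'[a].length := by
    have := hd.2 a; rwa [hrow, hrow'] at this
  apply List.ext_getElem hlen
  intro b hb hb'
  have := hc a b
  unfold pvCell at this
  rwa [hrow, hrow', List.getD_eq_getElem _ _ hb, List.getD_eq_getElem _ _ hb'] at this

-- ---------- columns and cells ----------

theorem pv_col_length (m : Nat) (g : List (List Int)) (j : Nat) : (pvCol m g j).length = m := by
  simp [pvCol]

theorem pv_col_getD (m : Nat) (g : List (List Int)) (j : Nat) (i : Nat) (h : i < m) :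
    (pvCol m g j).getD i 0 = pvCell g i j := by
  unfold pvCol
  rw [List.getD_eq_getElem _ _ (by simpa using h)]
  simp

theorem pv_findMi_col (m : Nat) (g : List (List Int)) (j : Nat) (k : Nat) (h : k < m) :
    pvFindMi g j k = pvColFindMi (pvCol m g j) k := by
  induction k with
  | zero => rfl
  | succ k ih =>
    unfold pvFindMi pvColFindMi
    rw [pv_col_getD m g j (k+1) h]
    split
    · exact ih (by omega)
    · rfl

-- ---------- locality of the column operations ----------

theorem pv_colFindMi_append (q : List Int) (x : Int) (k : Nat) (h : k < q.length) :
    pvColFindMi (q ++ [x]) k = pvColFindMi q k := by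
  induction k with
  | zero => rfl
  | succ k ih =>
    unfold pvColFindMi
    rw [List.getD_eq_getElem?_getD, List.getElem?_append_left h, ← List.getD_eq_getElem?_getD]
    split
    · exact ih (by omega)
    · rfl

theorem pv_colFindMi_le (c : List Int) (k : Nat) : pvColFindMi c k ≤ k := by
  induction k with
  | zero => exact le_refl 0
  | succ k ih =>
    unfold pvColFindMi
    split
    · omega
    · exact le_refl _

theorem pv_getD_append_left (q : List Int) (x : Int) (k : Nat) (h : k < q.length) :
    (q ++ [x]).getD k 0 = q.getD k 0 := by
  rw [List.getD_eq_getElem?_getD, List.getElem?_append_left h, ← List.getD_eq_getElem?_getD]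

theorem pv_set_append_left (q : List Int) (x : Int) (k : Nat) (v : Int) (h : k < q.length) :
    (q ++ [x]).set k v = q.set k v ++ [x] := by
  rw [List.set_append, if_pos h]

theorem pv_colGravOp_append (q : List Int) (x : Int) (i : Nat) (h : i < q.length) :
    pvColGravOp (q ++ [x]) i = pvColGravOp q i ++ [x] := by
  unfold pvColGravOp
  rw [pv_getD_append_left q x i h, pv_colFindMi_append q x i h]
  have hmi : pvColFindMi q i < q.length := lt_of_le_of_lt (pv_colFindMi_le q i) h
  split
  · rw [pv_getD_append_left q x _ hmi, pv_set_append_left q x i _ h,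
      pv_set_append_left _ x _ 0 (by simpa using hmi)]
  · rfl

theorem pv_colGravOp_length (c : List Int) (i : Nat) : (pvColGravOp c i).length = c.length := by
  unfold pvColGravOp
  split <;> simp

theorem pv_colGrav_fold_append (is : List Nat) (q : List Int) (x : Int)
    (h : ∀ i ∈ is, i < q.length) :
    (q ++ [x] |> is.foldl pvColGravOp) = is.foldl pvColGravOp q ++ [x] := by
  induction is generalizing q with
  | nil => rfl
  | cons i t ih =>
    simp only [List.foldl_cons]
    rw [pv_colGravOp_append q x i (h i (by simp))]
    exact ih _ (fun i' hi' => (pv_colGravOp_length q i) ▸ h i' (by simp [hi']))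

-- ---------- characterization of the search for the lowest non-zero cell ----------

theorem pv_colFindMi_all_zero (c : List Int) (k : Nat)
    (h : ∀ t, t ≤ k → c.getD t 0 = 0) : pvColFindMi c k = 0 := by
  induction k with
  | zero => rfl
  | succ k ih =>
    unfold pvColFindMi
    rw [if_pos (h (k+1) (le_refl _))]
    exact ih (fun t ht => h t (by omega))

theorem pv_colFindMi_last_nz (c : List Int) (k : Nat) (mi : Nat)
    (hle : mi ≤ k) (hnz : c.getD mi 0 ≠ 0)
    (habove : ∀ t, mi < t → t ≤ k → c.getD t 0 = 0) : pvColFindMi c k = mi := by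
  induction k with
  | zero =>
    interval_cases mi
    rfl
  | succ k ih =>
    unfold pvColFindMi
    by_cases hmi : mi = k + 1
    · rw [if_neg (hmi ▸ hnz)]
      exact hmi.symm
    · rw [if_pos (habove (k+1) (by omega) (le_refl _))]
      exact ih (by omega) (fun t ht1 ht2 => habove t ht1 (by omega))

-- ---------- algebra of pvColSpec ----------

theorem pv_colSpec_append_nz (q : List Int) (x : Int) (hx : x ≠ 0) :
    pvColSpec (q ++ [x]) = pvColSpec q ++ [x] := by
  unfold pvColSpec
  have hc : List.countP (fun v => !(v == 0)) (q ++ [x]) =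
      List.countP (fun v => !(v == 0)) q + 1 := by
    simp [List.countP_append, hx]
  have hf : (q ++ [x]).filter (fun v => !(v == 0)) = q.filter (fun v => !(v == 0)) ++ [x] := by
    simp [List.filter_append, hx]
  rw [hc, hf]
  have hlen : List.countP (fun v => !(v == 0)) q ≤ q.length := List.countP_le_length
  have : q.length + 1 - (List.countP (fun v => !(v == 0)) q + 1)
      = q.length - List.countP (fun v => !(v == 0)) q := by omega
  simp [this, List.append_assoc]

theorem pv_colSpec_all_zero (c : List Int) (h : ∀ v ∈ c, v = 0) : pvColSpec c = c := by
  unfold pvColSpec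
  have hc : List.countP (fun v => !(v == 0)) c = 0 := by
    rw [List.countP_eq_zero]
    intro v hv
    simp [h v hv]
  have hf : c.filter (fun v => !(v == 0)) = [] := by
    rw [List.filter_eq_nil_iff]
    intro v hv
    simp [h v hv]
  rw [hc, hf]
  simp
  exact (List.eq_replicate_iff.mpr ⟨rfl, h⟩).symm

theorem pv_colSpec_pull (q : List Int) (mi : Nat) (hmi : mi < q.length)
    (hv : q.getD mi 0 ≠ 0) (habove : ∀ t, mi < t → t < q.length → q.getD t 0 = 0) :
    pvColSpec (q.set mi 0) ++ [q.getD mi 0] = pvColSpec (q ++ [0]) := by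
  set v := q.getD mi 0 with hvdef
  have hq : q = q.take mi ++ v :: q.drop (mi+1) := by
    conv_lhs => rw [← List.take_append_drop mi q, ← List.getElem_cons_drop hmi]
    rw [hvdef, List.getD_eq_getElem _ _ hmi]
  have hset : q.set mi 0 = q.take mi ++ 0 :: q.drop (mi+1) := by
    rw [List.set_eq_take_append_cons_drop, if_pos hmi]
  have hdrop : ∀ w ∈ q.drop (mi+1), w = 0 := by
    intro w hw
    obtain ⟨t, ht, rfl⟩ := List.mem_iff_getElem.mp hw
    have hlt : mi + 1 + t < q.length := by
      have := List.length_drop (l := q) (i := mi+1); omega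
    rw [List.getElem_drop]
    rw [← List.getD_eq_getElem _ 0 hlt]
    exact habove _ (by omega) hlt
  have hfd : (q.drop (mi+1)).filter (fun v => !(v == 0)) = [] := by
    rw [List.filter_eq_nil_iff]; intro w hw; simp [hdrop w hw]
  have hcd : List.countP (fun v => !(v == 0)) (q.drop (mi+1)) = 0 := by
    rw [List.countP_eq_zero]; intro w hw; simp [hdrop w hw]
  have hvb2 : (!(v == 0)) = true := by simpa using hv
  have hfs : (q.set mi 0).filter (fun v => !(v == 0))
      = (q.take mi).filter (fun v => !(v == 0)) := by
    rw [hset]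
    simp [List.filter_append, hfd]
  have hcs : List.countP (fun v => !(v == 0)) (q.set mi 0)
      = List.countP (fun v => !(v == 0)) (q.take mi) := by
    rw [hset]
    simp [List.countP_append, hcd]
  have hfq : (q ++ [0]).filter (fun v => !(v == 0))
      = (q.take mi).filter (fun v => !(v == 0)) ++ [v] := by
    conv_lhs => rw [hq]
    simp [List.filter_append, hfd, hvb2]
  have hcq : List.countP (fun v => !(v == 0)) (q ++ [0])
      = List.countP (fun v => !(v == 0)) (q.take mi) + 1 := by
    conv_lhs => rw [hq]
    simp [List.countP_append, hcd, hvb2]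
  have hctle : List.countP (fun v => !(v == 0)) (q.take mi) ≤ mi := by
    calc List.countP (fun v => !(v == 0)) (q.take mi) ≤ (q.take mi).length :=
        List.countP_le_length
      _ ≤ mi := by simp
  unfold pvColSpec
  rw [hfs, hcs, hfq, hcq, List.length_set, List.length_append]
  have harith : q.length + [(0:Int)].length - (List.countP (fun v => !(v == 0)) (q.take mi) + 1)
      = q.length - List.countP (fun v => !(v == 0)) (q.take mi) := by
    simp only [List.length_cons, List.length_nil]
    omega
  rw [harith, List.append_assoc]

-- ---------- the bottom-up compaction of one column equals zeros ++ non-zeros ----------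

theorem pv_range'_reverse_cons (k : Nat) :
    (List.range' 1 (k+1)).reverse = (k+1) :: (List.range' 1 k).reverse := by
  rw [List.range'_1_concat, List.reverse_append]
  simp [Nat.add_comm]

theorem pv_set_self (l : List Int) (i : Nat) (v : Int) (h : l[i]? = some v) : l.set i v = l := by
  apply List.ext_getElem?
  intro j
  rw [List.getElem?_set]
  split
  · next hij =>
    subst hij
    obtain ⟨hl, -⟩ := List.getElem?_eq_some_iff.mp h
    rw [if_pos hl, h]
  · rfl

theorem pv_colGravity_spec : ∀ (M : Nat) (c : List Int), c.length = M →
    ((List.range' 1 (M-1)).reverse).foldl pvColGravOp c = pvColSpec c := by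
  intro M
  induction M with
  | zero =>
    intro c hc
    rw [List.length_eq_zero_iff.mp hc]
    rfl
  | succ m ih =>
    intro c hc
    cases m with
    | zero =>
      -- single cell, no steps
      obtain ⟨x, rfl⟩ := List.length_eq_one_iff.mp hc
      by_cases hx : x = 0
      · subst hx
        simp [pvColSpec, List.range'_zero]
      · simp [pvColSpec, List.range'_zero, hx, List.replicate, hx]
    | succ k =>
      rcases c.eq_nil_or_concat with rfl | ⟨q, x, rfl⟩
      · simp at hc
      simp only [List.concat_eq_append] at hc ⊢
      have hq : q.length = k + 1 := by simpa using hc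
      rw [show (k+1+1) - 1 = k + 1 from rfl, pv_range'_reverse_cons k, List.foldl_cons]
      have hmem : ∀ i ∈ (List.range' 1 k).reverse, i < q.length := by
        intro i hi
        simp [List.mem_range'_1] at hi
        omega
      have hgetx : (q ++ [x]).getD (k+1) 0 = x := by
        rw [List.getD_eq_getElem?_getD]
        rw [List.getElem?_append_right (by omega)]
        simp [hq]
      by_cases hx : x = 0
      · subst hx
        -- last cell already empty: pull down the lowest non-zero above, if any
        by_cases hall : ∀ w ∈ q, w = 0
        · -- everything zero: the op is the identity
          have hz : ∀ t, t ≤ k + 1 → (q ++ [0]).getD t 0 = 0 := by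
            intro t ht
            by_cases htq : t < q.length
            · rw [pv_getD_append_left _ _ _ htq, List.getD_eq_getElem _ _ htq]
              exact hall _ (List.getElem_mem htq)
            · by_cases hteq : t = q.length
              · subst hteq
                rw [List.getD_eq_getElem?_getD, List.getElem?_append_right (by omega)]
                simp
              · rw [List.getD_eq_getElem?_getD, List.getElem?_eq_none (by simp; omega)]
                rfl
          have hop : pvColGravOp (q ++ [0]) (k+1) = q ++ [0] := by
            unfold pvColGravOp
            rw [pv_colFindMi_all_zero _ _ hz]
            rw [hz (k+1) (le_refl _), if_pos rfl, hz 0 (by omega)]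
            have h1 : (q ++ [0]).set (k+1) 0 = q ++ [0] := by
              apply pv_set_self
              rw [List.getElem?_append_right (by omega)]
              simp [hq]
            rw [h1]
            apply pv_set_self
            cases q with
            | nil => simp at hq
            | cons w t =>
              have : w = 0 := hall w (by simp)
              simp [this]
          rw [hop]
          have ih' : List.foldl pvColGravOp q (List.range' 1 k).reverse = pvColSpec q := by
            simpa using ih q hq
          rw [pv_colGrav_fold_append _ _ _ hmem, ih']
          have hall0 : ∀ w ∈ q ++ [(0:Int)], w = 0 := by
            intro w hw
            rcases List.mem_append.mp hw with hw | hw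
            · exact hall w hw
            · simpa using hw
          rw [pv_colSpec_all_zero q hall, pv_colSpec_all_zero _ hall0]
        · -- there is a non-zero cell: it is pulled to the bottom
          push_neg at hall
          obtain ⟨w, hwmem, hwnz⟩ := hall
          obtain ⟨t0, ht0, rfl⟩ := List.mem_iff_getElem.mp hwmem
          set P := fun t => (q ++ [(0:Int)]).getD t 0 ≠ 0 with hP
          have hPt0 : P t0 := by
            show (q ++ [0]).getD t0 0 ≠ 0
            rw [pv_getD_append_left _ _ _ ht0, List.getD_eq_getElem _ _ ht0]
            exact hwnz
          set mi := Nat.findGreatest P (k+1) with hmi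
          have hmile : mi ≤ k + 1 := Nat.findGreatest_le _
          have hPmi : P mi := by
            have ht0le : t0 ≤ k + 1 := by omega
            exact Nat.findGreatest_spec ht0le hPt0
          have hmiq : mi < q.length := by
            rcases Nat.lt_or_ge mi q.length with h | h
            · exact h
            · exfalso
              apply hPmi
              have hmieq : mi = q.length := by omega
              rw [hmieq]
              rw [List.getD_eq_getElem?_getD, List.getElem?_append_right (le_refl _)]
              simp
          have habove : ∀ t, mi < t → t ≤ k + 1 → (q ++ [0]).getD t 0 = 0 := by
            intro t ht1 ht2
            by_cases htq : t ≤ k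
            · have := Nat.findGreatest_is_greatest (P := P) ht1 (by omega)
              rw [hP] at this
              simpa using this
            · have hteq : t = k + 1 := by omega
              subst hteq
              rw [List.getD_eq_getElem?_getD, List.getElem?_append_right (by omega)]
              simp [hq]
          have hfind : pvColFindMi (q ++ [0]) (k+1) = mi :=
            pv_colFindMi_last_nz _ _ mi hmile hPmi habove
          have hvQ : (q ++ [0]).getD mi 0 = q.getD mi 0 := pv_getD_append_left _ _ _ hmiq
          have hop : pvColGravOp (q ++ [0]) (k+1) = q.set mi 0 ++ [q.getD mi 0] := by
            unfold pvColGravOp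
            rw [hfind]
            rw [hgetx, if_pos rfl, hvQ]
            have hs1 : (q ++ [0]).set (k+1) (q.getD mi 0) = q ++ [q.getD mi 0] := by
              rw [List.set_append, if_neg (by omega)]
              simp [hq]
            rw [hs1, pv_set_append_left _ _ _ _ hmiq]
          have ih2 : List.foldl pvColGravOp (q.set mi 0) (List.range' 1 k).reverse
              = pvColSpec (q.set mi 0) := by
            simpa using ih (q.set mi 0) (by simp [hq])
          rw [hop, pv_colGrav_fold_append _ _ _
            (fun i hi => by rw [List.length_set]; exact hmem i hi), ih2]
          apply pv_colSpec_pull q mi hmiq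
          · rw [← hvQ]; exact hPmi
          · intro t ht1 ht2
            rw [← pv_getD_append_left q 0 t ht2]
            exact habove t ht1 (by omega)
      · -- bottom cell non-zero: untouched this step
        have hop : pvColGravOp (q ++ [x]) (k+1) = q ++ [x] := by
          unfold pvColGravOp
          rw [hgetx, if_neg hx]
        have ih' : List.foldl pvColGravOp q (List.range' 1 k).reverse = pvColSpec q := by
          simpa using ih q hq
        rw [hop, pv_colGrav_fold_append _ _ _ hmem, ih', pv_colSpec_append_nz q x hx]


-- ---------- the grid gravity loops act column by column ----------

theorem pv_findMi_le (g : List (List Int)) (j : Nat) (k : Nat) : pvFindMi g j k ≤ k := by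
  induction k with
  | zero => exact le_refl 0
  | succ k ih =>
    unfold pvFindMi
    split
    · omega
    · exact le_refl _

theorem pv_dims_foldl {α : Type} (f : List (List Int) → α → List (List Int))
    (hf : ∀ g x, pvDims g (f g x)) (l : List α) (g : List (List Int)) :
    pvDims g (l.foldl f g) := by
  induction l generalizing g with
  | nil => exact pv_dims_refl g
  | cons x t ih => exact pv_dims_trans (hf g x) (ih (f g x))

theorem pv_col_congr (M : Nat) (g g' : List (List Int)) (j : Nat)
    (h : ∀ a, a < M → pvCell g a j = pvCell g' a j) : pvCol M g j = pvCol M g' j := by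
  unfold pvCol
  apply List.map_congr_left
  intro a ha
  exact h a (List.mem_range.mp ha)

theorem pv_cell_set_untouched (g : List (List Int)) (i j : Nat) (v : Int) (a b : Nat)
    (h : i ≠ a ∨ j ≠ b) : pvCell (pvSet g i j v) a b = pvCell g a b := by
  rw [pv_pvCell_pvSet]
  apply if_neg
  rintro ⟨h1, h2, -⟩
  rcases h with h | h
  · exact h h1
  · exact h h2

theorem pv_gravOp_off (g : List (List Int)) (i j M : Nat) (hi : i < M) :
    ∀ a b, (M ≤ a ∨ b ≠ j) → pvCell (pvGravOp g i j) a b = pvCell g a b := by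
  intro a b hab
  have hmi : pvFindMi g j i ≤ i := pv_findMi_le g j i
  have hone : ∀ (g' : List (List Int)) (i' : Nat), i' < M →
      pvCell (pvSet g' i' j 0) a b = pvCell g' a b ∧
      ∀ v, pvCell (pvSet g' i' j v) a b = pvCell g' a b := by
    intro g' i' hi'
    constructor
    · apply pv_cell_set_untouched
      rcases hab with h | h
      · left; omega
      · right; exact fun hh => h hh.symm
    · intro v
      apply pv_cell_set_untouched
      rcases hab with h | h
      · left; omega
      · right; exact fun hh => h hh.symm
  unfold pvGravOp
  split
  · dsimp only
    rw [(hone _ (pvFindMi g j i) (by omega)).1, ((hone g i hi).2 _)]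
  · rfl

theorem pv_gravOp_col (g : List (List Int)) (i j M N : Nat)
    (hs1 : M ≤ g.length) (hs2 : ∀ a, a < M → N ≤ (g.getD a []).length)
    (hi : i < M) (hj : j < N) :
    pvCol M (pvGravOp g i j) j = pvColGravOp (pvCol M g j) i := by
  have hmile : pvFindMi g j i ≤ i := pv_findMi_le g j i
  unfold pvGravOp pvColGravOp
  rw [pv_col_getD M g j i hi, ← pv_findMi_col M g j i hi]
  split
  · next hz =>
    dsimp only
    rw [pv_col_getD M g j _ (by omega)]
    set mi := pvFindMi g j i with hmidef
    set v := pvCell g mi j with hvdef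
    have hin1 : i < g.length ∧ j < (g.getD i []).length :=
      ⟨by omega, by have := hs2 i hi; omega⟩
    have hin2 : mi < (pvSet g i j v).length ∧ j < ((pvSet g i j v).getD mi []).length := by
      rw [pv_length_pvSet, pv_rowlen_pvSet]
      exact ⟨by omega, by have := hs2 mi (by omega); omega⟩
    apply List.ext_getElem
    · simp [pv_col_length]
    intro a ha ha'
    have haM : a < M := by
      rw [pv_col_length] at ha
      exact ha
    have hcolget : ∀ (g' : List (List Int)) (hh : a < (pvCol M g' j).length),
        (pvCol M g' j)[a] = pvCell g' a j := by
      intro g' hh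
      simp [pvCol]
    rw [hcolget _ ha, List.getElem_set, List.getElem_set, pv_pvCell_pvSet, pv_pvCell_pvSet]
    by_cases h1 : mi = a
    · rw [if_pos ⟨h1, rfl, hin2.1, hin2.2⟩, if_pos h1]
    · rw [if_neg (fun hh => h1 hh.1), if_neg h1]
      by_cases h2 : i = a
      · rw [if_pos ⟨h2, rfl, hin1.1, hin1.2⟩, if_pos h2]
      · rw [if_neg (fun hh => h2 hh.1), if_neg h2]
        simp [pvCol]
  · exact pv_col_congr M _ g j (fun a ha => rfl)
theorem pv_dims_inner (g : List (List Int)) (i : Nat) (js : List Nat) :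
    pvDims g (js.foldl (fun g j => pvGravOp g i j) g) :=
  pv_dims_foldl _ (fun g j => pv_dims_gravOp g i j) js g

theorem pv_grav_inner_off (g : List (List Int)) (i M : Nat) (hi : i < M) (js : List Nat) :
    ∀ a b, (M ≤ a ∨ b ∉ js) → pvCell (js.foldl (fun g j => pvGravOp g i j) g) a b = pvCell g a b := by
  induction js generalizing g with
  | nil => intro a b _; rfl
  | cons j t ih =>
    intro a b hab
    simp only [List.foldl_cons]
    have hab' : M ≤ a ∨ b ∉ t := by
      rcases hab with h | h
      · exact Or.inl h
      · exact Or.inr (fun hh => h (by simp [hh]))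
    rw [ih _ a b hab']
    apply pv_gravOp_off g i j M hi
    rcases hab with h | h
    · exact Or.inl h
    · exact Or.inr (fun hh => h (by simp [hh]))

theorem pv_grav_inner_col_off (g : List (List Int)) (i M : Nat) (hi : i < M)
    (js : List Nat) (j0 : Nat) (hj0 : j0 ∉ js) :
    pvCol M (js.foldl (fun g j => pvGravOp g i j) g) j0 = pvCol M g j0 :=
  pv_col_congr M _ g j0 (fun a _ => pv_grav_inner_off g i M hi js a j0 (Or.inr hj0))

theorem pv_grav_inner_col (i M N : Nat) (hi : i < M) (js : List Nat) (hnd : js.Nodup)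
    (hjs : ∀ j ∈ js, j < N) : ∀ (g : List (List Int)), pvShapeN M N g → ∀ j0 ∈ js,
    pvCol M (js.foldl (fun g j => pvGravOp g i j) g) j0 = pvColGravOp (pvCol M g j0) i := by
  induction js with
  | nil => intro g _ j0 h; simp at h
  | cons j t ih =>
    intro g hs j0 hj0
    simp only [List.foldl_cons]
    rcases List.mem_cons.mp hj0 with rfl | hj0t
    · have hj0nt : j0 ∉ t := (List.nodup_cons.mp hnd).1
      rw [pv_grav_inner_col_off _ i M hi t j0 hj0nt]
      exact pv_gravOp_col g i j0 M N hs.1 hs.2 hi (hjs j0 (by simp))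
    · have hcoleq : pvCol M (pvGravOp g i j) j0 = pvCol M g j0 := by
        apply pv_col_congr
        intro a _
        apply pv_gravOp_off g i j M hi
        exact Or.inr (fun hh => (List.nodup_cons.mp hnd).1 (hh ▸ hj0t))
      rw [ih (List.nodup_cons.mp hnd).2 (fun j' hj' => hjs j' (by simp [hj']))
        (pvGravOp g i j) (pv_shape_of_dims hs (pv_dims_gravOp g i j)) j0 hj0t, hcoleq]

theorem pv_grav_outer (M N : Nat) (is : List Nat) (him : ∀ i ∈ is, i < M) :
    ∀ (g : List (List Int)), pvShapeN M N g →
    (∀ a b, (M ≤ a ∨ N ≤ b) →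
      pvCell (is.foldl (fun g i => (List.range N).foldl (fun g j => pvGravOp g i j) g) g) a b
        = pvCell g a b) ∧
    (∀ j0, j0 < N →
      pvCol M (is.foldl (fun g i => (List.range N).foldl (fun g j => pvGravOp g i j) g) g) j0
        = is.foldl pvColGravOp (pvCol M g j0)) := by
  induction is with
  | nil => intro g _; exact ⟨fun a b _ => rfl, fun j0 _ => rfl⟩
  | cons i t ih =>
    intro g hs
    have hiM : i < M := him i (by simp)
    have hs' : pvShapeN M N ((List.range N).foldl (fun g j => pvGravOp g i j) g) :=
      pv_shape_of_dims hs (pv_dims_inner g i _)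
    have iht := ih (fun i' hi' => him i' (by simp [hi'])) _ hs'
    simp only [List.foldl_cons]
    constructor
    · intro a b hab
      rw [iht.1 a b hab]
      apply pv_grav_inner_off g i M hiM
      rcases hab with h | h
      · exact Or.inl h
      · exact Or.inr (by simp; omega)
    · intro j0 hj0
      rw [iht.2 j0 hj0,
        pv_grav_inner_col i M N hiM (List.range N) (List.nodup_range)
        (fun j' hj' => List.mem_range.mp hj') g hs j0 (List.mem_range.mpr hj0)]

-- ---------- applying the delete list / the marked set ----------

theorem pv_zeroAll_cell (l : List (Nat × Nat)) :
    ∀ (g : List (List Int)), (∀ p ∈ l, p.1 < g.length ∧ p.2 < (g.getD p.1 []).length) →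
    ∀ a b, pvCell (l.foldl (fun g p => pvSet g p.1 p.2 0) g) a b
      = if (a, b) ∈ l then 0 else pvCell g a b := by
  induction l with
  | nil => intro g _ a b; simp
  | cons p t ih =>
    intro g hin a b
    simp only [List.foldl_cons]
    have hin' : ∀ q ∈ t, q.1 < (pvSet g p.1 p.2 0).length
        ∧ q.2 < ((pvSet g p.1 p.2 0).getD q.1 []).length := by
      intro q hq
      rw [pv_length_pvSet, pv_rowlen_pvSet]
      exact hin q (by simp [hq])
    rw [ih _ hin' a b]
    by_cases ht : (a, b) ∈ t
    · simp [ht]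
    · rw [if_neg ht, pv_pvCell_pvSet]
      by_cases hp : p.1 = a ∧ p.2 = b
      · have hmem : (a, b) ∈ p :: t := by
          rw [← hp.1, ← hp.2]
          simp
        rw [if_pos ⟨hp.1, hp.2, (hin p (by simp)).1, (hin p (by simp)).2⟩, if_pos hmem]
      · have hmem : ¬ (a, b) ∈ p :: t := by
          intro hh
          rcases List.mem_cons.mp hh with hh | hh
          · exact hp ⟨congrArg Prod.fst hh.symm, congrArg Prod.snd hh.symm⟩
          · exact ht hh
        rw [if_neg (fun hh => hp ⟨hh.1, hh.2.1⟩), if_neg hmem]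

theorem pv_delete_mem_bounds (m n : Int) (g : List (List Int)) :
    ∀ p ∈ pvDelete m n g, p.1 < (m-1).toNat + 1 ∧ p.2 < (n-1).toNat + 1 := by
  unfold pvDelete
  suffices h : ∀ (is : List Nat), (∀ i ∈ is, i < (m-1).toNat) → ∀ (acc : List (Nat × Nat)),
      (∀ p ∈ acc, p.1 < (m-1).toNat + 1 ∧ p.2 < (n-1).toNat + 1) →
      ∀ p ∈ is.foldl (fun acc i => (List.range (n-1).toNat).foldl (fun acc j =>
        if pvCell g i j = pvCell g i (j+1) ∧ pvCell g i j ≠ 0 then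
          if pvCell g i j = pvCell g (i+1) j ∧ pvCell g (i+1) j = pvCell g (i+1) (j+1) then
            acc ++ [(i,j), (i,j+1), (i+1,j), (i+1,j+1)]
          else acc
        else acc) acc) acc, p.1 < (m-1).toNat + 1 ∧ p.2 < (n-1).toNat + 1 by
    exact h _ (fun i hi => List.mem_range.mp hi) [] (by simp)
  intro is
  induction is with
  | nil => intro _ acc hacc; simpa using hacc
  | cons i t ih =>
    intro hbd acc hacc
    simp only [List.foldl_cons]
    apply ih (fun i' hi' => hbd i' (by simp [hi']))
    have hiM : i < (m-1).toNat := hbd i (by simp)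
    have inner : ∀ (js : List Nat), (∀ j ∈ js, j < (n-1).toNat) →
        ∀ (acc : List (Nat × Nat)), (∀ p ∈ acc, p.1 < (m-1).toNat + 1 ∧ p.2 < (n-1).toNat + 1) →
        ∀ p ∈ js.foldl (fun acc j =>
          if pvCell g i j = pvCell g i (j+1) ∧ pvCell g i j ≠ 0 then
            if pvCell g i j = pvCell g (i+1) j ∧ pvCell g (i+1) j = pvCell g (i+1) (j+1) then
              acc ++ [(i,j), (i,j+1), (i+1,j), (i+1,j+1)]
            else acc
          else acc) acc, p.1 < (m-1).toNat + 1 ∧ p.2 < (n-1).toNat + 1 := by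
      intro js
      induction js with
      | nil => intro _ acc hacc; simpa using hacc
      | cons j jt ihj =>
        intro hjs acc hacc
        simp only [List.foldl_cons]
        apply ihj (fun j' hj' => hjs j' (by simp [hj']))
        have hjN : j < (n-1).toNat := hjs j (by simp)
        intro p hp
        split at hp
        · split at hp
          · simp only [List.mem_append, List.mem_cons] at hp
            rcases hp with hp | hp
            · exact hacc p hp
            · rcases hp with rfl | rfl | rfl | rfl | h
              · exact ⟨by omega, by omega⟩
              · exact ⟨by omega, by omega⟩
              · exact ⟨by omega, by omega⟩
              · exact ⟨by omega, by omega⟩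
              · simp at h
          · exact hacc p hp
        · exact hacc p hp
    exact inner _ (fun j hj => List.mem_range.mp hj) acc hacc

theorem pv_mark_mem (m n : Int) (g : List (List Int)) :
    ∀ p, p ∈ pvDelete m n g ↔ p ∈ pvMarkedSet m n g := by
  unfold pvDelete pvMarkedSet
  suffices h : ∀ (is : List Nat) (accA : List (Nat × Nat)) (accS : PySem.Set (Nat × Nat)),
      (∀ p, p ∈ accA ↔ p ∈ accS) →
      ∀ p, p ∈ is.foldl (fun acc i => (List.range (n-1).toNat).foldl (fun acc j =>
        if pvCell g i j = pvCell g i (j+1) ∧ pvCell g i j ≠ 0 then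
          if pvCell g i j = pvCell g (i+1) j ∧ pvCell g (i+1) j = pvCell g (i+1) (j+1) then
            acc ++ [(i,j), (i,j+1), (i+1,j), (i+1,j+1)]
          else acc
        else acc) acc) accA ↔
      p ∈ is.foldl (fun s i => (List.range (n-1).toNat).foldl (fun s j =>
        let v := pvCell g i j
        if v ≠ 0 ∧ v = pvCell g i (j+1) ∧ v = pvCell g (i+1) j ∧ v = pvCell g (i+1) (j+1) then
          PySem.Set.update s [(i,j), (i,j+1), (i+1,j), (i+1,j+1)]
        else s) s) accS by
    exact h _ [] PySem.Set.empty (by simp [PySem.Set.empty])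
  intro is
  induction is with
  | nil => intro accA accS hacc; simpa using hacc
  | cons i t ih =>
    intro accA accS hacc
    simp only [List.foldl_cons]
    apply ih
    generalize (List.range (n-1).toNat) = js
    induction js generalizing accA accS with
    | nil => simpa using hacc
    | cons j jt ihj =>
      simp only [List.foldl_cons]
      apply ihj
      intro p
      by_cases hcA : pvCell g i j = pvCell g i (j+1) ∧ pvCell g i j ≠ 0
      · by_cases hcA2 : pvCell g i j = pvCell g (i+1) j ∧ pvCell g (i+1) j = pvCell g (i+1) (j+1)
        · have hcB : pvCell g i j ≠ 0 ∧ pvCell g i j = pvCell g i (j+1)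
              ∧ pvCell g i j = pvCell g (i+1) j ∧ pvCell g i j = pvCell g (i+1) (j+1) :=
            ⟨hcA.2, hcA.1, hcA2.1, hcA2.1.trans hcA2.2⟩
          rw [if_pos hcA, if_pos hcA2, if_pos hcB]
          rw [PySem.Set.mem_update]
          simp only [List.mem_append, List.mem_cons]
          constructor
          · rintro (h | h)
            · exact Or.inl ((hacc p).mp h)
            · right; simpa using h
          · rintro (h | h)
            · exact Or.inl ((hacc p).mpr h)
            · right; simpa using h
        · have hcB : ¬ (pvCell g i j ≠ 0 ∧ pvCell g i j = pvCell g i (j+1)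
              ∧ pvCell g i j = pvCell g (i+1) j ∧ pvCell g i j = pvCell g (i+1) (j+1)) := by
            rintro ⟨h1, h2, h3, h4⟩
            exact hcA2 ⟨h3, h3.symm.trans h4⟩
          rw [if_pos hcA, if_neg hcA2, if_neg hcB]
          exact hacc p
      · have hcB : ¬ (pvCell g i j ≠ 0 ∧ pvCell g i j = pvCell g i (j+1)
            ∧ pvCell g i j = pvCell g (i+1) j ∧ pvCell g i j = pvCell g (i+1) (j+1)) := by
          rintro ⟨h1, h2, -⟩
          exact hcA ⟨h2, h1⟩
        rw [if_neg hcA, if_neg hcB]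
        exact hacc p

theorem pv_delete_nil_iff (m n : Int) (g : List (List Int)) :
    pvDelete m n g = [] ↔ pvMarkedSet m n g = [] := by
  rw [List.eq_nil_iff_forall_not_mem, List.eq_nil_iff_forall_not_mem]
  constructor
  · intro h p hp
    exact h p ((pv_mark_mem m n g p).mpr hp)
  · intro h p hp
    exact h p ((pv_mark_mem m n g p).mp hp)

-- ---------- B's column rebuild, characterized ----------

def pvStack (M : Nat) (marked : PySem.Set (Nat × Nat)) (g : List (List Int)) (j : Nat) :
    List Int :=
  ((List.range M).filter
    (fun i => !(pvCell g i j == 0) && !(PySem.Set.contains marked (i, j)))).map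
    (fun i => pvCell g i j)

def pvColL (M : Nat) (marked : PySem.Set (Nat × Nat)) (g : List (List Int)) (j : Nat) :
    List Int :=
  List.replicate (M - (pvStack M marked g j).length) 0 ++ pvStack M marked g j

theorem pv_rebuild_eq (m : Int) (marked : PySem.Set (Nat × Nat)) (g : List (List Int)) (j : Nat) :
    pvRebuildCol m marked g j
      = (List.range m.toNat).foldl
          (fun g' i => pvSet g' i j ((pvColL m.toNat marked g j).getD i 0)) g := by
  unfold pvRebuildCol pvColL pvStack
  rfl

theorem pv_dims_rebuild (m : Int) (marked : PySem.Set (Nat × Nat)) (g : List (List Int)) (j : Nat) :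
    pvDims g (pvRebuildCol m marked g j) := by
  rw [pv_rebuild_eq]
  exact pv_dims_foldl _ (fun g i => pv_dims_pvSet ..) _ g

theorem pv_writes_cell (j : Nat) (colL : List Int) (M N : Nat) (hj : j < N) :
    ∀ (is : List Nat), (∀ i ∈ is, i < M) → ∀ (g : List (List Int)), pvShapeN M N g → ∀ a b,
    pvCell (is.foldl (fun g i => pvSet g i j (colL.getD i 0)) g) a b
      = if b = j ∧ a ∈ is then colL.getD a 0 else pvCell g a b := by
  intro is
  induction is with
  | nil => intro _ g _ a b; simp
  | cons i t ih =>
    intro him g hs a b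
    simp only [List.foldl_cons]
    rw [ih (fun i' hi' => him i' (by simp [hi'])) _
      (pv_shape_of_dims hs (pv_dims_pvSet ..)) a b]
    by_cases h1 : b = j ∧ a ∈ t
    · rw [if_pos h1, if_pos ⟨h1.1, by simp [h1.2]⟩]
    · rw [if_neg h1, pv_pvCell_pvSet]
      by_cases h2 : i = a ∧ j = b
      · have hiM : i < M := him i (by simp)
        have hin : i < g.length ∧ j < (g.getD i []).length :=
          ⟨by have := hs.1; omega, by have := hs.2 i hiM; omega⟩
        rw [if_pos ⟨h2.1, h2.2, hin.1, hin.2⟩, if_pos ⟨h2.2.symm, by simp [← h2.1]⟩, ← h2.1]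
      · rw [if_neg (fun hh => h2 ⟨hh.1, hh.2.1⟩)]
        have : ¬ (b = j ∧ a ∈ i :: t) := by
          rintro ⟨rfl, hmem⟩
          rcases List.mem_cons.mp hmem with rfl | hmem
          · exact h2 ⟨rfl, rfl⟩
          · exact h1 ⟨rfl, hmem⟩
        rw [if_neg this]

theorem pv_colL_congr (M : Nat) (marked : PySem.Set (Nat × Nat)) (j : Nat)
    (g g' : List (List Int)) (h : ∀ i, i < M → pvCell g i j = pvCell g' i j) :
    pvColL M marked g j = pvColL M marked g' j := by
  have hst : pvStack M marked g j = pvStack M marked g' j := by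
    unfold pvStack
    rw [List.filter_congr (fun i hi => by rw [h i (List.mem_range.mp hi)])]
    apply List.map_congr_left
    intro i hi
    exact h i (List.mem_range.mp (List.mem_of_mem_filter hi))
  unfold pvColL
  rw [hst]

theorem pv_rebuildCol_cell (m : Int) (marked : PySem.Set (Nat × Nat)) (g : List (List Int))
    (j N : Nat) (hs : pvShapeN m.toNat N g) (hj : j < N) :
    ∀ a b, pvCell (pvRebuildCol m marked g j) a b
      = if b = j ∧ a < m.toNat then (pvColL m.toNat marked g j).getD a 0 else pvCell g a b := by
  intro a b
  rw [pv_rebuild_eq]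
  rw [pv_writes_cell j _ m.toNat N hj _ (fun i hi => List.mem_range.mp hi) g hs a b]
  simp [List.mem_range]

theorem pv_roundB_cell (m : Int) (marked : PySem.Set (Nat × Nat)) (N : Nat) :
    ∀ (js : List Nat), js.Nodup → (∀ j ∈ js, j < N) →
    ∀ (g : List (List Int)), pvShapeN m.toNat N g → ∀ a b,
    pvCell (js.foldl (fun g j => pvRebuildCol m marked g j) g) a b
      = if b ∈ js ∧ a < m.toNat then (pvColL m.toNat marked g b).getD a 0 else pvCell g a b := by
  intro js
  induction js with
  | nil => intro _ _ g _ a b; simp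
  | cons j t ih =>
    intro hnd hjs g hs a b
    simp only [List.foldl_cons]
    rw [ih (List.nodup_cons.mp hnd).2 (fun j' hj' => hjs j' (by simp [hj'])) _
      (pv_shape_of_dims hs (pv_dims_rebuild ..)) a b]
    have hjN : j < N := hjs j (by simp)
    by_cases h1 : b ∈ t ∧ a < m.toNat
    · rw [if_pos h1, if_pos ⟨by simp [h1.1], h1.2⟩]
      have hbj : b ≠ j := fun hh => (List.nodup_cons.mp hnd).1 (hh ▸ h1.1)
      congr 1
      apply pv_colL_congr
      intro i hi
      rw [pv_rebuildCol_cell m marked g j N hs hjN i b, if_neg (fun hh => hbj hh.1)]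
    · rw [if_neg h1, pv_rebuildCol_cell m marked g j N hs hjN a b]
      by_cases h2 : b = j ∧ a < m.toNat
      · rw [if_pos h2, if_pos ⟨by simp [h2.1], h2.2⟩, h2.1]
      · rw [if_neg h2]
        have : ¬ (b ∈ j :: t ∧ a < m.toNat) := by
          rintro ⟨hmem, hA⟩
          rcases List.mem_cons.mp hmem with rfl | hmem
          · exact h2 ⟨rfl, hA⟩
          · exact h1 ⟨hmem, hA⟩
        rw [if_neg this]

-- ---------- A's round result equals B's round result ----------

theorem pv_dims_symm {g g' : List (List Int)} (h : pvDims g g') : pvDims g' g :=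
  ⟨h.1.symm, fun a => (h.2 a).symm⟩

theorem pv_contains_iff (s : PySem.Set (Nat × Nat)) (x : Nat × Nat) :
    PySem.Set.contains s x = true ↔ x ∈ s := by simp

theorem pv_spec_colL (m n : Int) (g : List (List Int)) (hm : 1 ≤ m) (hn : 1 ≤ n)
    (b : Nat) (hb : b < n.toNat) :
    pvColSpec (pvCol m.toNat ((pvDelete m n g).foldl (fun g p => pvSet g p.1 p.2 0) g) b)
      = pvColL m.toNat (pvMarkedSet m n g) g b := by
  set M := m.toNat with hM
  set delete := pvDelete m n g with hdel
  set marked := pvMarkedSet m n g with hmrk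
  set g1 := delete.foldl (fun g p => pvSet g p.1 p.2 0) g with hg1
  have hdel_in : ∀ p ∈ delete, p.1 < g.length ∧ p.2 < (g.getD p.1 []).length := by
    intro p hp
    exact pv_cell_in_of_nz g p.1 p.2 (pv_delete_mem_nz m n g p hp)
  have hcells : ∀ a c, pvCell g1 a c = if (a, c) ∈ delete then 0 else pvCell g a c := by
    intro a c
    rw [hg1]
    exact pv_zeroAll_cell delete g hdel_in a c
  have hcol : pvCol M g1 b
      = (List.range M).map (fun i => if (i, b) ∈ delete then 0 else pvCell g i b) := by
    unfold pvCol
    exact List.map_congr_left (fun i _ => hcells i b)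
  have hmem : ∀ (i : Nat), ((i, b) ∈ delete) ↔ ((i, b) ∈ marked) := fun i => pv_mark_mem m n g (i, b)
  have hfil : (pvCol M g1 b).filter (fun v => !(v == 0)) = pvStack M marked g b := by
    rw [hcol, List.filter_map]
    unfold pvStack
    have hpred : ∀ i ∈ List.range M,
        ((fun v => !(v == 0)) ∘ (fun i => if (i, b) ∈ delete then 0 else pvCell g i b)) i
          = (fun i => !(pvCell g i b == 0) && !(PySem.Set.contains marked (i, b))) i := by
      intro i _
      by_cases hmem2 : (i, b) ∈ delete
      · have hcont : PySem.Set.contains marked (i, b) = true :=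
          (pv_contains_iff _ _).mpr ((hmem i).mp hmem2)
        simp only [Function.comp_apply, if_pos hmem2, hcont]
        simp
      · have hcont : (i, b) ∉ marked := fun hc => hmem2 ((hmem i).mpr hc)
        simp only [Function.comp_apply, if_neg hmem2]
        simp [hcont]
    rw [List.filter_congr hpred]
    apply List.map_congr_left
    intro i hi
    have := (List.mem_filter.mp hi).2
    simp only [Bool.and_eq_true] at this
    have hnm : ¬ (i, b) ∈ delete := by
      intro hc
      have hcont : PySem.Set.contains marked (i, b) = true :=
        (pv_contains_iff _ _).mpr ((hmem i).mp hc)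
      rw [hcont] at this
      simpa using this.2
    rw [if_neg hnm]
  have hlen : (pvCol M g1 b).length = M := pv_col_length ..
  have hcount : List.countP (fun v => !(v == 0)) (pvCol M g1 b)
      = (pvStack M marked g b).length := by
    rw [List.countP_eq_length_filter, hfil]
  unfold pvColSpec pvColL
  rw [hfil, hlen, hcount]

theorem pv_round_eq (m n : Int) (g : List (List Int)) (hm : 1 < m) (hn : 0 < n)
    (hs : pvShapeN m.toNat n.toNat g) :
    (pvGame m n g).2
      = (List.range n.toNat).foldl (fun g' j => pvRebuildCol m (pvMarkedSet m n g) g' j) g := by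
  set M := m.toNat with hM
  set N := n.toNat with hN
  set delete := pvDelete m n g with hdel
  set marked := pvMarkedSet m n g with hmrk
  set g1 := delete.foldl (fun g p => pvSet g p.1 p.2 0) g with hg1
  have hMpos : 1 ≤ M := by omega
  have hNpos : 1 ≤ N := by omega
  have hdims1 : pvDims g g1 := pv_dims_foldl _ (fun g p => pv_dims_pvSet ..) delete g
  have hs1 : pvShapeN M N g1 := pv_shape_of_dims hs hdims1
  have hA : (pvGame m n g).2
      = ((List.range' 1 (m-1).toNat).reverse).foldl (fun g i =>
          (List.range N).foldl (fun g j => pvGravOp g i j) g) g1 := rfl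
  have him : ∀ i ∈ (List.range' 1 (m-1).toNat).reverse, i < M := by
    intro i hi
    rw [List.mem_reverse] at hi
    have := List.mem_range'_1.mp hi
    omega
  have houter := pv_grav_outer M N ((List.range' 1 (m-1).toNat).reverse) him g1 hs1
  have hdimsA : pvDims g (pvGame m n g).2 := by
    rw [hA]
    exact pv_dims_trans hdims1 (pv_dims_foldl _ (fun g i => pv_dims_inner g i _) _ g1)
  have hdimsB : pvDims g
      ((List.range N).foldl (fun g' j => pvRebuildCol m marked g' j) g) :=
    pv_dims_foldl _ (fun g' j => pv_dims_rebuild ..) _ g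
  apply pv_eq_of_cells (pv_dims_trans (pv_dims_symm hdimsA) hdimsB)
  intro a b
  have hBcell := pv_roundB_cell m marked N (List.range N) List.nodup_range
    (fun j hj => List.mem_range.mp hj) g hs a b
  by_cases hreg : a < M ∧ b < N
  · -- inside the play region: both columns are "zeros, then the surviving non-zeros"
    have hcolA : pvCol M (pvGame m n g).2 b = pvColSpec (pvCol M g1 b) := by
      rw [hA]
      rw [houter.2 b hreg.2]
      have hM1 : (m-1).toNat = M - 1 := by omega
      rw [hM1]
      exact pv_colGravity_spec M (pvCol M g1 b) (pv_col_length ..)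
    have hcellA : pvCell (pvGame m n g).2 a b = (pvColSpec (pvCol M g1 b)).getD a 0 := by
      rw [← hcolA, pv_col_getD M _ b a hreg.1]
    rw [hcellA, hBcell, if_pos ⟨List.mem_range.mpr hreg.2, hreg.1⟩,
      pv_spec_colL m n g (by omega) (by omega) b hreg.2]
  · -- outside: untouched by both sides
    have hoff : M ≤ a ∨ N ≤ b := by omega
    have hnd : ¬ (a, b) ∈ delete := by
      intro hc
      have hb := pv_delete_mem_bounds m n g (a, b) hc
      have e1 : (m-1).toNat + 1 = M := by omega
      have e2 : (n-1).toNat + 1 = N := by omega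
      rw [e1, e2] at hb
      dsimp at hb
      omega
    have hcellA : pvCell (pvGame m n g).2 a b = pvCell g a b := by
      rw [hA, houter.1 a b hoff]
      rw [hg1, pv_zeroAll_cell delete g (fun p hp =>
        pv_cell_in_of_nz g p.1 p.2 (pv_delete_mem_nz m n g p hp)) a b, if_neg hnd]
    have hnB : ¬ ((b ∈ List.range N) ∧ a < M) := by
      rintro ⟨hmem, hA'⟩
      rcases hoff with h | h
      · omega
      · exact absurd (List.mem_range.mp hmem) (by omega)
    rw [hcellA, hBcell, if_neg hnB]

-- ---------- gravity never changes the number of zeros (it only swaps cells) ----------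

theorem pv_countZeros_set (g : List (List Int)) (i j : Nat) (v : Int)
    (hi : i < g.length) (hj' : j < (g.getD i []).length) :
    pvCountZeros (pvSet g i j v) + (if pvCell g i j = 0 then 1 else 0)
      = pvCountZeros g + (if v = 0 then 1 else 0) := by
  have hrow : g.getD i [] = g[i] := List.getD_eq_getElem g [] hi
  have hj : j < g[i].length := by rw [hrow] at hj'; exact hj'
  rw [pv_countZeros_eq, pv_countZeros_eq]
  unfold pvSet pvCell
  rw [pv_modify_in g i _ hi, List.map_set]
  have hml : i < (g.map (fun r => (r.count 0 : Int))).length := by simpa using hi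
  have hs := pv_sum_set_int (g.map (fun r => (r.count 0 : Int))) i
      ((g[i].set j v).count 0 : Int) hml
  rw [List.getElem_map] at hs
  have hcp := List.countP_set (p := fun w => w == 0) (l := g[i]) (i := j) (a := v) hj
  have hle1 : g[i][j] = 0 → 1 ≤ List.countP (fun w => w == 0) g[i] := by
    intro hz
    have hp : (fun w => w == 0) g[i][j] = true := by simp [hz]
    have hpos := List.countP_pos_iff (p := fun w => w == 0) (l := g[i]) |>.mpr
      ⟨g[i][j], List.getElem_mem hj, hp⟩
    omega
  have hcnt : ∀ (r : List Int), (r.count 0 : Int) = (List.countP (fun w => w == 0) r : Int) := by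
    intro r
    rw [List.count]
  rw [hrow, List.getD_eq_getElem _ _ hj]
  have hcp' : List.countP (fun w => w == 0) (g[i].set j v) + (if g[i][j] = 0 then 1 else 0)
      = List.countP (fun w => w == 0) g[i] + (if v = 0 then 1 else 0) := by
    rcases eq_or_ne (g[i][j]) 0 with hz | hz <;> rcases eq_or_ne v 0 with hv | hv <;>
      simp [hz, hv] at hcp ⊢
    · omega
    · have h1 := hle1 hz; omega
    · omega
    · omega
  have hcc : ((g[i].set j v).count 0 : Int) + (if g[i][j] = 0 then 1 else 0)
      = (g[i].count 0 : Int) + (if v = 0 then 1 else 0) := by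
    rw [hcnt (g[i].set j v), hcnt g[i]]
    exact_mod_cast hcp'
  rcases eq_or_ne (g[i][j]) 0 with hz | hz <;> rcases eq_or_ne v 0 with hv | hv <;>
    simp [hz, hv] at hcc hs ⊢ <;> omega

theorem pv_countZeros_gravOp (M N : Nat) (g : List (List Int)) (i j : Nat)
    (hs : pvShapeN M N g) (hi : i < M) (hj : j < N) :
    pvCountZeros (pvGravOp g i j) = pvCountZeros g := by
  have hmile : pvFindMi g j i ≤ i := pv_findMi_le g j i
  have hin1 : i < g.length ∧ j < (g.getD i []).length :=
    ⟨by have := hs.1; omega, by have := hs.2 i hi; omega⟩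
  have hin2 : pvFindMi g j i < g.length ∧ j < (g.getD (pvFindMi g j i) []).length :=
    ⟨by have := hs.1; omega, by have := hs.2 (pvFindMi g j i) (by omega); omega⟩
  unfold pvGravOp
  split
  · next hz =>
    dsimp only
    set mi := pvFindMi g j i with hmidef
    set v := pvCell g mi j with hvdef
    have h1 := pv_countZeros_set g i j v hin1.1 hin1.2
    have h2 := pv_countZeros_set (pvSet g i j v) mi j 0
      (by rw [pv_length_pvSet]; exact hin2.1) (by rw [pv_rowlen_pvSet]; exact hin2.2)
    by_cases hmi : mi = i
    · have hv0 : v = 0 := by rw [hvdef, hmi]; exact hz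
      have hcell : pvCell (pvSet g i j v) mi j = 0 := by
        rw [hmi, pv_pvCell_pvSet, if_pos ⟨rfl, rfl, hin1.1, hin1.2⟩, hv0]
      rw [hcell] at h2
      rw [hz] at h1
      simp [hv0] at h1 h2 ⊢
      omega
    · have hcell : pvCell (pvSet g i j v) mi j = v := by
        rw [pv_pvCell_pvSet, if_neg (fun hh => hmi hh.1.symm)]
      rw [hcell] at h2
      rw [hz] at h1
      rcases eq_or_ne v 0 with hv | hv <;> simp [hv] at h1 h2 ⊢ <;> omega
  · rfl

theorem pv_countZeros_grav_fold (M N : Nat) (is : List Nat) (him : ∀ i ∈ is, i < M) :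
    ∀ (g : List (List Int)), pvShapeN M N g →
    pvCountZeros (is.foldl (fun g i => (List.range N).foldl (fun g j => pvGravOp g i j) g) g)
      = pvCountZeros g := by
  induction is with
  | nil => intro g _; rfl
  | cons i t ih =>
    intro g hs
    simp only [List.foldl_cons]
    have hiM : i < M := him i (by simp)
    have hinner : ∀ (js : List Nat), (∀ j ∈ js, j < N) → ∀ (g' : List (List Int)),
        pvShapeN M N g' →
        pvCountZeros (js.foldl (fun g j => pvGravOp g i j) g') = pvCountZeros g' := by
      intro js
      induction js with
      | nil => intro _ g' _; rfl
      | cons j jt ihj =>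
        intro hjs g' hs'
        simp only [List.foldl_cons]
        rw [ihj (fun j' hj' => hjs j' (by simp [hj'])) _
          (pv_shape_of_dims hs' (pv_dims_gravOp g' i j))]
        exact pv_countZeros_gravOp M N g' i j hs' hiM (hjs j (by simp))
    rw [ih (fun i' hi' => him i' (by simp [hi'])) _
      (pv_shape_of_dims hs (pv_dims_inner g i _))]
    exact hinner _ (fun j hj => List.mem_range.mp hj) g hs

-- ---------- degenerate board sizes: nothing ever matches ----------

theorem pv_foldl_const {α β : Type} (l : List α) (x : β) : l.foldl (fun a _ => a) x = x := by
  induction l with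
  | nil => rfl
  | cons y t ih => simpa using ih

theorem pv_trivial_delete (m n : Int) (g : List (List Int)) (h : ¬ (1 < m ∧ 0 < n)) :
    pvDelete m n g = [] := by
  unfold pvDelete
  by_cases hm : 1 < m
  · have hn : n ≤ 0 := by omega
    have h1 : (n-1).toNat = 0 := by omega
    simp only [h1, List.range_zero, List.foldl_nil]
    exact pv_foldl_const _ _
  · have h1 : (m-1).toNat = 0 := by omega
    simp [h1]

theorem pv_trivial_game2 (m n : Int) (g : List (List Int)) (h : ¬ (1 < m ∧ 0 < n)) :
    (pvGame m n g).2 = g := by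
  unfold pvGame
  dsimp only
  rw [pv_trivial_delete m n g h, List.foldl_nil]
  by_cases hm : 1 < m
  · have hn : n ≤ 0 := by omega
    have h1 : n.toNat = 0 := by omega
    simp only [h1, List.range_zero, List.foldl_nil]
    exact pv_foldl_const _ _
  · have h1 : (m-1).toNat = 0 := by omega
    simp [h1]

-- ---------- the two loops agree round by round ----------

theorem pv_loop_eq (m n : Int) : ∀ (fuel : Nat) (g : List (List Int)),
    ((1 < m ∧ 0 < n) → pvShapeN m.toNat n.toNat g) → pvCountNZ g < fuel →
    pvLoopA m n g = pvLoopB m n fuel g := by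
  intro fuel
  induction fuel with
  | zero => intro g _ hf; omega
  | succ k ih =>
    intro g hshape hfuel
    rw [pvLoopA]
    by_cases htriv : 1 < m ∧ 0 < n
    · have hs := hshape htriv
      by_cases hD : pvDelete m n g = []
      · have hlen : (pvGame m n g).1 = 0 := by
          show (pvDelete m n g).length = 0
          rw [hD]
          rfl
        rw [dif_pos hlen]
        have hmarked : pvMarkedSet m n g = [] := (pv_delete_nil_iff m n g).mp hD
        show pvCountZeros (pvGame m n g).2 = pvLoopB m n (k+1) g
        have hg2 : pvCountZeros (pvGame m n g).2 = pvCountZeros g := by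
          have hA : (pvGame m n g).2
              = ((List.range' 1 (m-1).toNat).reverse).foldl (fun g i =>
                  (List.range n.toNat).foldl (fun g j => pvGravOp g i j) g)
                  ((pvDelete m n g).foldl (fun g p => pvSet g p.1 p.2 0) g) := rfl
          rw [hA, hD, List.foldl_nil]
          apply pv_countZeros_grav_fold m.toNat n.toNat _ _ g hs
          intro i hi
          rw [List.mem_reverse] at hi
          have := List.mem_range'_1.mp hi
          omega
        rw [hg2]
        show _ = if (pvMarkedSet m n g).isEmpty then pvCountZeros g
          else pvLoopB m n k ((List.range n.toNat).foldl
            (fun g' j => pvRebuildCol m (pvMarkedSet m n g) g' j) g)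
        rw [hmarked]
        rfl
      · have hlen : ¬ (pvGame m n g).1 = 0 := by
          show ¬ (pvDelete m n g).length = 0
          simpa using hD
        rw [dif_neg hlen]
        have hmarked : ¬ pvMarkedSet m n g = [] := fun hh => hD ((pv_delete_nil_iff m n g).mpr hh)
        have hBstep : pvLoopB m n (k+1) g = pvLoopB m n k ((List.range n.toNat).foldl
            (fun g' j => pvRebuildCol m (pvMarkedSet m n g) g' j) g) := by
          show (if (pvMarkedSet m n g).isEmpty then pvCountZeros g
            else pvLoopB m n k ((List.range n.toNat).foldl
              (fun g' j => pvRebuildCol m (pvMarkedSet m n g) g' j) g)) = _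
          rw [if_neg (by simpa [List.isEmpty_iff] using hmarked)]
        rw [hBstep, ← pv_round_eq m n g htriv.1 htriv.2 hs]
        apply ih
        · intro _
          apply pv_shape_of_dims hs
          have hA : (pvGame m n g).2
              = ((List.range' 1 (m-1).toNat).reverse).foldl (fun g i =>
                  (List.range n.toNat).foldl (fun g j => pvGravOp g i j) g)
                  ((pvDelete m n g).foldl (fun g p => pvSet g p.1 p.2 0) g) := rfl
          rw [hA]
          exact pv_dims_trans (pv_dims_foldl _ (fun g p => pv_dims_pvSet ..) _ g)
            (pv_dims_foldl _ (fun g i => pv_dims_inner g i _) _ _)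
        · have := pvGame_decreases m n g hlen
          omega
    · have hdel : pvDelete m n g = [] := pv_trivial_delete m n g htriv
      have hlen : (pvGame m n g).1 = 0 := by
        show (pvDelete m n g).length = 0
        rw [hdel]
        rfl
      rw [dif_pos hlen]
      show pvCountZeros (pvGame m n g).2 = pvLoopB m n (k+1) g
      rw [pv_trivial_game2 m n g htriv]
      have hmarked : pvMarkedSet m n g = [] := (pv_delete_nil_iff m n g).mp hdel
      show _ = if (pvMarkedSet m n g).isEmpty then pvCountZeros g
        else pvLoopB m n k ((List.range n.toNat).foldl
          (fun g' j => pvRebuildCol m (pvMarkedSet m n g) g' j) g)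
      rw [hmarked]
      rfl

-- ===== VERDICT (by name: the statement is the Claim_ definition above) =====
theorem solution_spec : Claim_equal_solution := by
  intro m n board hdom hpre
  unfold Spec_solution solution solution_alt
  apply pv_loop_eq
  · rintro ⟨hm, hn⟩
    obtain ⟨hb1, hb2⟩ := hpre hm hn
    constructor
    · unfold pvToGrid
      rw [List.length_map]
      omega
    · intro i hi
      unfold pvToGrid
      have hib : i < board.length := by omega
      have hrow : (board.map (fun s => s.toList.map (fun c => (c.toNat : Int)))).getD i []
          = board[i].toList.map (fun c => (c.toNat : Int)) := by
        rw [List.getD_eq_getElem _ _ (by simpa using hib), List.getElem_map]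
      rw [hrow, List.length_map]
      have hmem : board[i] ∈ board.take m.toNat := by
        have hlt : i < (board.take m.toNat).length := by
          rw [List.length_take]
          omega
        have hmm := List.getElem_mem hlt
        rwa [List.getElem_take] at hmm
      have := hb2 board[i] hmem
      have hsl : (board[i] : String).length = board[i].toList.length := rfl
      omega
  · omega
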